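-- pv_equiv track=rewrite | github.com/aniket-ae/SEEQST | tools/setup.py | generate_observable_sets
-- ===== SOURCE A (Python) =====
-- from itertools import product
--
-- def generate_observable_sets(selective_blocks, num_qubits):
--     """
--     For each selective block, generate two sets of Pauli observables [E, O],
--     where E = observables with even number of 'Y', O = with odd number of 'Y'.
--
--     Parameters:
--         selective_blocks (list): List of integers like [3, 4]
--         num_qubits (int): Number of qubits (N)
--
--     Returns:
--         dict: {block: [E_set, O_set]} where E_set and O_set are lists of Pauli strings
--     """
--     observable_sets = {}
--
--     for block in selective_blocks:
--         bin_block = format(block, f'0{num_qubits}b')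
--
--         # Prepare options for each qubit position
--         pauli_options = []
--         for bit in bin_block:
--             if bit == '1':
--                 pauli_options.append(('X', 'Y'))  # bit flip positions
--             else:
--                 pauli_options.append(('I', 'Z'))  # identity/control positions
--
--         # Generate all combinations (2^N strings)
--         all_observables = [''.join(p) for p in product(*pauli_options)]
--
--         # Split into even-Y and odd-Y sets
--         even_set = [obs for obs in all_observables if obs.count('Y') % 2 == 0]
--         odd_set  = [obs for obs in all_observables if obs.count('Y') % 2 == 1]
--
--         # Store result
--         observable_sets[block] = [even_set, odd_set]
--
--     return observable_sets
-- ===== SOURCE B (Python) =====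
-- def generate_observable_sets(selective_blocks, num_qubits):
--     """Partition-during-generation: expand partial strings position by position,
--     carrying each partial string's running Y-parity bit, then route every finished
--     string to the even or odd list in one pass (no full product list, no count()
--     filtering passes)."""
--     observable_sets = {}
--     for block in selective_blocks:
--         bits = format(block, f'0{num_qubits}b')
--         states = [('', False)]
--         for bit in bits:
--             if bit == '1':
--                 states = [nxt for s, par in states
--                           for nxt in ((s + 'X', par), (s + 'Y', not par))]
--             else:
--                 states = [nxt for s, par in states
--                           for nxt in ((s + 'I', par), (s + 'Z', par))]
--         even, odd = [], []
--         for s, par in states: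
--             (odd if par else even).append(s)
--         observable_sets[block] = [even, odd]
--     return observable_sets
-- ===== Notes on version B (the rewrite author's own statement) =====
-- stated objective: alternative
-- what changed: Replaces generate-all-then-filter-twice (full product list plus two count('Y') filter passes) with a single recursion over positions that carries a running Y-parity bit and appends each completed string directly to the even or odd list.
import Mathlib
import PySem

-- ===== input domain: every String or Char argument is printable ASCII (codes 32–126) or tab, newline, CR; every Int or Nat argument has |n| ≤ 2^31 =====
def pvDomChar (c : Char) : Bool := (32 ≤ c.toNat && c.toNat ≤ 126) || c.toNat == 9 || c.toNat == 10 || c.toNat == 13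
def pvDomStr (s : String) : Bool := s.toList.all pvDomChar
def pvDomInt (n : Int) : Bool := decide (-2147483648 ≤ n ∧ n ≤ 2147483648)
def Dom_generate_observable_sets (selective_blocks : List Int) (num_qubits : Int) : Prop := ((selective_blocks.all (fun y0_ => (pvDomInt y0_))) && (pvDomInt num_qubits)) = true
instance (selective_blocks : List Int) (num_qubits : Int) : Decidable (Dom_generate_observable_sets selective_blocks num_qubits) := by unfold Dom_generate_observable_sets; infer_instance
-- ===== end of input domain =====

-- B replaces A's generate-all-then-filter-twice by one recursion that routes each
-- string to the even/odd list as it is built (objective: alternative decomposition).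

-- shared helper: format(n, f'0{w}b') — sign-aware zero padding of PySem.Int.toBinChars (= format(n,'b'))
def pvFmt0b (n : Int) (w : Int) : List Char :=
  let raw := PySem.Int.toBinChars n
  if (raw.length : Int) < w then
    if n < 0 then '-' :: (List.replicate (w.toNat - raw.length) '0' ++ raw.tail)
    else List.replicate (w.toNat - raw.length) '0' ++ raw
  else raw

-- ===== PORT A =====
-- itertools.product over a list of pairs, joined; leftmost factor varies slowest
def pvProdJoin : List (Char × Char) → List (List Char)
  | [] => [[]]
  | (a, b) :: rest =>
      let t := pvProdJoin rest
      t.map (fun cs => a :: cs) ++ t.map (fun cs => b :: cs)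

-- A's loop body (one block)
def pvStepA (num_qubits : Int) (d : PySem.Dict Int (List (List String))) (block : Int) :
    PySem.Dict Int (List (List String)) :=
  let bin_block := pvFmt0b block num_qubits
  let pauli_options := bin_block.foldl (fun acc bit =>
    acc ++ [if bit = '1' then (('X', 'Y') : Char × Char) else ('I', 'Z')]) []
  let all_observables := (pvProdJoin pauli_options).map (fun p => String.ofList p)
  let even_set := all_observables.filter (fun obs => obs.toList.count 'Y' % 2 == 0)
  let odd_set := all_observables.filter (fun obs => obs.toList.count 'Y' % 2 == 1)
  d.insert block [even_set, odd_set]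

def generate_observable_sets (selective_blocks : List Int) (num_qubits : Int) : List (Int × List (List String)) :=
  (selective_blocks.foldl (pvStepA num_qubits)
    (PySem.Dict.empty : PySem.Dict Int (List (List String)))).items

-- ===== PORT B =====
-- one expansion level: every partial state (prefix, parity) branches on the current bit
def pvExpand (states : List (List Char × Bool)) (bit : Char) : List (List Char × Bool) :=
  if bit = '1' then
    states.flatMap (fun p => [(p.1 ++ ['X'], p.2), (p.1 ++ ['Y'], !p.2)])
  else
    states.flatMap (fun p => [(p.1 ++ ['I'], p.2), (p.1 ++ ['Z'], p.2)])

-- B's loop body (one block): expand level by level, then split by the carried parity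
def pvStepB (num_qubits : Int) (d : PySem.Dict Int (List (List String))) (block : Int) :
    PySem.Dict Int (List (List String)) :=
  let bits := pvFmt0b block num_qubits
  let states := bits.foldl pvExpand [([], false)]
  let eo := states.foldl (fun eo p =>
    if p.2 then (eo.1, eo.2 ++ [String.ofList p.1]) else (eo.1 ++ [String.ofList p.1], eo.2))
    (([], []) : List String × List String)
  d.insert block [eo.1, eo.2]

def generate_observable_sets_alt (selective_blocks : List Int) (num_qubits : Int) : List (Int × List (List String)) :=
  (selective_blocks.foldl (pvStepB num_qubits)
    (PySem.Dict.empty : PySem.Dict Int (List (List String)))).items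

-- ===== PRECONDITION & SPEC =====
-- Pre_ excludes num_qubits < 0 with a nonempty block list, on which A's format(block, f'0{num_qubits}b') raises ValueError (B raises there too); with an empty list the loop never runs and both return [].
def Pre_generate_observable_sets (selective_blocks : List Int) (num_qubits : Int) : Prop := selective_blocks = [] ∨ 0 ≤ num_qubits
instance (selective_blocks : List Int) (num_qubits : Int) : Decidable (Pre_generate_observable_sets selective_blocks num_qubits) := by unfold Pre_generate_observable_sets; infer_instance

def pvWitness_generate_observable_sets : List Int × Int := ([3, 0, -2], 2)

def Spec_generate_observable_sets (selective_blocks : List Int) (num_qubits : Int) (out : List (Int × List (List String))) : Prop := out = generate_observable_sets_alt selective_blocks num_qubits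
instance (selective_blocks : List Int) (num_qubits : Int) (out : List (Int × List (List String))) : Decidable (Spec_generate_observable_sets selective_blocks num_qubits out) := by unfold Spec_generate_observable_sets; infer_instance

-- ===== CLAIM (what is proved, stated in full; the proofs are below) =====
def Claim_equal_generate_observable_sets : Prop := ∀ (selective_blocks : List Int) (num_qubits : Int), Dom_generate_observable_sets selective_blocks num_qubits → Pre_generate_observable_sets selective_blocks num_qubits → Spec_generate_observable_sets selective_blocks num_qubits (generate_observable_sets selective_blocks num_qubits)

-- ===== LEMMAS AND PROOFS =====

-- A's pauli_options loop is an append-fold; it equals a map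
lemma pvOpts_foldl (bits : List Char) (acc : List (Char × Char)) :
    bits.foldl (fun acc bit =>
      acc ++ [if bit = '1' then (('X', 'Y') : Char × Char) else ('I', 'Z')]) acc
    = acc ++ bits.map (fun bit => if bit = '1' then (('X', 'Y') : Char × Char) else ('I', 'Z')) := by
  induction bits generalizing acc with
  | nil => simp
  | cons b rest ih => simp [List.foldl_cons, ih]

-- core invariant: expanding level by level produces A's product list, each element
-- prefixed by its source state's prefix and tagged with the accumulated Y-parity
lemma pvExpand_foldl (bits : List Char) (states : List (List Char × Bool)) :
    bits.foldl pvExpand states =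
      states.flatMap (fun p =>
        (pvProdJoin (bits.map (fun bit => if bit = '1' then (('X', 'Y') : Char × Char) else ('I', 'Z')))).map
          (fun cs => (p.1 ++ cs, xor p.2 (cs.count 'Y' % 2 == 1)))) := by
  induction bits generalizing states with
  | nil => simp [pvProdJoin]
  | cons b rest ih =>
      rw [List.foldl_cons, ih]
      by_cases hb : b = '1' <;>
        [simp only [pvExpand, hb, reduceIte, List.map_cons, pvProdJoin, List.flatMap_assoc];
         simp only [pvExpand, if_neg hb, List.map_cons, pvProdJoin, List.flatMap_assoc]] <;>
        · apply List.flatMap_congr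
          intro p _
          simp only [List.flatMap_cons, List.flatMap_nil, List.append_nil, List.map_append, List.map_map]
          congr 1 <;>
          · apply List.map_congr_left
            intro cs _
            rcases Nat.mod_two_eq_zero_or_one (cs.count 'Y') with h | h <;>
              cases p.2 <;>
                simp [Nat.add_mod, h, List.append_assoc]

-- the final pass routes each state into the even/odd pair by its parity bit
lemma pvSplit_foldl (L : List (List Char × Bool)) (e o : List String) :
    L.foldl (fun eo p =>
      if p.2 then (eo.1, eo.2 ++ [String.ofList p.1]) else (eo.1 ++ [String.ofList p.1], eo.2)) (e, o) =
    (e ++ (L.filter (fun p => !p.2)).map (fun p => String.ofList p.1),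
     o ++ (L.filter (fun p => p.2)).map (fun p => String.ofList p.1)) := by
  induction L generalizing e o with
  | nil => simp
  | cons p rest ih =>
      cases hp : p.2 <;> simp [List.foldl_cons, hp, ih, List.append_assoc]

-- the per-block step functions agree
lemma pvStep_eq (num_qubits : Int) (d : PySem.Dict Int (List (List String))) (block : Int) :
    pvStepA num_qubits d block = pvStepB num_qubits d block := by
  unfold pvStepA pvStepB
  simp only [pvOpts_foldl, List.nil_append, pvExpand_foldl, List.flatMap_singleton,
    pvSplit_foldl, List.nil_append, List.filter_map, List.map_map]
  congr 1
  simp only [List.cons.injEq, and_true]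
  constructor <;>
  · simp only [Function.comp_def, Bool.false_xor]
    apply congrArg
    apply List.filter_congr
    intro cs _
    rcases Nat.mod_two_eq_zero_or_one (cs.count 'Y') with h | h <;> simp [h]

-- ===== VERDICT (by name: the statement is the Claim_ definition above) =====
theorem generate_observable_sets_spec : Claim_equal_generate_observable_sets := by
  intro selective_blocks num_qubits _ _
  unfold Spec_generate_observable_sets generate_observable_sets generate_observable_sets_alt
  rw [funext (fun d => funext (pvStep_eq num_qubits d))]
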